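-- pv_equiv track=rewrite | github.com/ruscher/tts-biglinux | usr/share/biglinux/tts-biglinux/ui/voice_manager_dialog.py | _guess_gender
-- ===== SOURCE A (Python) =====
-- def _guess_gender(name: str) -> str:
--     """Best-effort gender guess from voice name."""
--     female = {
--         "leticia", "natalia", "anna", "elena", "irina", "lyubov",
--         "marianna", "hana", "suze", "magda", "clb", "slt", "spomenka",
--         "natia", "arina", "tatiana", "victoria", "alicja", "karmela",
--         "dragana", "nazgul", "dilnavoz", "sevinch", "jasietka",
--     }
--     name_lower = name.lower().replace("-", "")
--     for f in female:
--         if f in name_lower: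
--             return "female"
--     return "male"
-- ===== SOURCE B (Python) =====
-- _BUCKETS = {
--     'a': ("anna", "arina", "alicja"),
--     'c': ("clb",),
--     'd': ("dragana", "dilnavoz"),
--     'e': ("elena",),
--     'h': ("hana",),
--     'i': ("irina",),
--     'j': ("jasietka",),
--     'k': ("karmela",),
--     'l': ("leticia", "lyubov"),
--     'm': ("marianna", "magda"),
--     'n': ("natalia", "natia", "nazgul"),
--     's': ("suze", "slt", "spomenka", "sevinch"),
--     't': ("tatiana",),
--     'v': ("victoria",),
-- }
--
--
-- def _guess_gender(name: str) -> str: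
--     """Best-effort gender guess from voice name."""
--     s = "".join(ch for ch in name.lower() if ch != "-")
--     for i, ch in enumerate(s):
--         for f in _BUCKETS.get(ch, ()):
--             if s.startswith(f, i):
--                 return "female"
--     return "male"
-- ===== Notes on version B (the rewrite author's own statement) =====
-- stated objective: alternative
-- what changed: A loops over the flat set of 24 female substrings and runs a full substring search for each; B groups the substrings into a dict keyed by first letter, normalizes by filtering hyphens out in one join, and makes a single left-to-right scan of the name, at each position looking up only the bucket for the current character and testing prefixes.
import Mathlib
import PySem

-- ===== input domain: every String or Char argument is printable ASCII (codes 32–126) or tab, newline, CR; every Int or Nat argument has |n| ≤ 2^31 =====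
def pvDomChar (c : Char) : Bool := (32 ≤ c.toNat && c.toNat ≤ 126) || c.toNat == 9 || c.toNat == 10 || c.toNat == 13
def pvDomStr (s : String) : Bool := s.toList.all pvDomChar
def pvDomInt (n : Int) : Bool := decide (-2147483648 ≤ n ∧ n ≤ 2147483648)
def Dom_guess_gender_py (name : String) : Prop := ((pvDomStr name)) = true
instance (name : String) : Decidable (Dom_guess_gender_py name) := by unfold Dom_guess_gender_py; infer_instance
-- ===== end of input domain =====

-- B replaces A's loop over a flat set of 24 substrings (a full substring search each)
-- by a first-letter bucket dictionary and one left-to-right scan of the normalized name,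
-- testing at each position only the bucket of the current character (objective: alternative).

-- ===== PORT A =====
-- the 'female' set, in source order (the return value is order-independent)
def pvFemale : List String :=
  ["leticia", "natalia", "anna", "elena", "irina", "lyubov",
   "marianna", "hana", "suze", "magda", "clb", "slt", "spomenka",
   "natia", "arina", "tatiana", "victoria", "alicja", "karmela",
   "dragana", "nazgul", "dilnavoz", "sevinch", "jasietka"]

-- 'for f in female: if f in name_lower: return "female"'
def pvLoopA : List String → String → String
  | [], _ => "male"
  | f :: rest, nl => if PySem.Str.isIn f nl then "female" else pvLoopA rest nl

def guess_gender_py (name : String) : String :=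
  let name_lower := PySem.Str.replace (PySem.Str.lower name) "-" ""
  pvLoopA pvFemale name_lower

-- ===== PORT B =====
-- _BUCKETS: the female names grouped by first letter (dict → association list)
def pvBuckets : List (Char × List String) :=
  [('a', ["anna", "arina", "alicja"]),
   ('c', ["clb"]),
   ('d', ["dragana", "dilnavoz"]),
   ('e', ["elena"]),
   ('h', ["hana"]),
   ('i', ["irina"]),
   ('j', ["jasietka"]),
   ('k', ["karmela"]),
   ('l', ["leticia", "lyubov"]),
   ('m', ["marianna", "magda"]),
   ('n', ["natalia", "natia", "nazgul"]),
   ('s', ["suze", "slt", "spomenka", "sevinch"]),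
   ('t', ["tatiana"]),
   ('v', ["victoria"])]

-- '_BUCKETS.get(key, ())': first-match lookup with default []
def pvGet : List (Char × List String) → Char → List String
  | [], _ => []
  | (k, v) :: rest, c => if k = c then v else pvGet rest c

-- 'for i, ch in enumerate(s): for f in _BUCKETS.get(ch, ()): if s.startswith(f, i): …'
-- (the scan walks the suffixes of s: at step i, 'c :: rest' is s[i:], so s.startswith(f, i) is the prefix test)
def pvScanB : List Char → String
  | [] => "male"
  | c :: rest =>
    if (pvGet pvBuckets c).any (fun f => PySem.Chars.startswith (c :: rest) f.toList) then
      "female"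
    else pvScanB rest

def guess_gender_py_alt (name : String) : String :=
  -- '"".join(ch for ch in name.lower() if ch != "-")'
  let s := (PySem.Str.lower name).toList.filter (fun ch => ch != '-')
  pvScanB s

-- ===== PRECONDITION & SPEC =====
def Spec_guess_gender_py (name : String) (out : String) : Prop := out = guess_gender_py_alt name
instance (name : String) (out : String) : Decidable (Spec_guess_gender_py name out) := by unfold Spec_guess_gender_py; infer_instance

-- ===== CLAIM (what is proved, stated in full; the proofs are below) =====
def Claim_equal_guess_gender_py : Prop := ∀ (name : String), Dom_guess_gender_py name → Spec_guess_gender_py name (guess_gender_py name)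

-- ===== LEMMAS AND PROOFS =====

-- a value delivered by the assoc-list lookup comes from some entry whose key matched
theorem pvGet_mem (L : List (Char × List String)) (c : Char) (f : String)
    (h : f ∈ pvGet L c) : ∃ p ∈ L, p.1 = c ∧ f ∈ p.2 := by
  induction L with
  | nil => simp [pvGet] at h
  | cons p rest ih =>
    obtain ⟨k, v⟩ := p
    by_cases hk : k = c
    · subst hk
      simp only [pvGet, if_true] at h
      exact ⟨(k, v), List.mem_cons_self, rfl, h⟩
    · simp only [pvGet, if_neg hk] at h
      obtain ⟨q, hq, h1, h2⟩ := ih h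
      exact ⟨q, List.mem_cons_of_mem _ hq, h1, h2⟩

-- every bucket member is a female name whose first letter is the bucket key
theorem mem_bucket (c : Char) (f : String) (h : f ∈ pvGet pvBuckets c) :
    f ∈ pvFemale ∧ f.toList.headD ' ' = c := by
  obtain ⟨p, hp, hc, hf⟩ := pvGet_mem _ _ _ h
  subst hc
  fin_cases hp <;> fin_cases hf <;> exact ⟨by decide, by decide⟩

-- every female name is nonempty and sits in the bucket of its first letter
theorem female_in_bucket :
    ∀ f ∈ pvFemale, f.toList ≠ [] ∧ f ∈ pvGet pvBuckets (f.toList.headD ' ') := by decide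

-- at a position starting with c, testing the bucket of c equals testing all female names
theorem bucket_any (c : Char) (rest : List Char) :
    (pvGet pvBuckets c).any (fun f => PySem.Chars.startswith (c :: rest) f.toList)
      = pvFemale.any (fun f => PySem.Chars.startswith (c :: rest) f.toList) := by
  rw [Bool.eq_iff_iff]
  simp only [List.any_eq_true]
  constructor
  · rintro ⟨f, hf, hs⟩
    exact ⟨f, (mem_bucket c f hf).1, hs⟩
  · rintro ⟨f, hf, hs⟩
    obtain ⟨hne, hb⟩ := female_in_bucket f hf
    have hpre : f.toList <+: c :: rest := (PySem.Chars.startswith_iff _ _).mp hs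
    have hhead : f.toList.headD ' ' = c := by
      cases hft : f.toList with
      | nil => exact absurd hft hne
      | cons a t =>
        rw [hft] at hpre
        obtain ⟨rfl, -⟩ := List.cons_prefix_cons.mp hpre
        simp
    rw [hhead] at hb
    exact ⟨f, hb, hs⟩

-- A's loop returns "female" iff some female name is a substring
theorem pvLoopA_eq (L : List String) (nl : String) :
    pvLoopA L nl = if L.any (fun f => PySem.Str.isIn f nl) then "female" else "male" := by
  induction L with
  | nil => simp [pvLoopA]
  | cons f rest ih =>
    simp only [pvLoopA, List.any_cons, ih]
    rcases Bool.eq_false_or_eq_true (PySem.Str.isIn f nl) with h | h <;>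
      simp only [h, Bool.true_or, Bool.false_or] <;> simp

-- B's bucketed scan returns "female" iff some female name is a substring
theorem pvScanB_eq (cs : List Char) :
    pvScanB cs = if pvFemale.any (fun f => PySem.Chars.isIn f.toList cs) then "female" else "male" := by
  induction cs with
  | nil => simp [pvScanB]; decide
  | cons c rest ih =>
    simp only [pvScanB, ih, bucket_any]
    have hcond : ∀ f : String,
        PySem.Chars.isIn f.toList (c :: rest)
          = (PySem.Chars.startswith (c :: rest) f.toList || PySem.Chars.isIn f.toList rest) := by
      intro f
      rw [Bool.eq_iff_iff]
      simp [PySem.Chars.isIn_iff_infix, PySem.Chars.startswith_iff, List.infix_cons_iff]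
    have hany : pvFemale.any (fun f => PySem.Chars.isIn f.toList (c :: rest))
        = (pvFemale.any (fun f => PySem.Chars.startswith (c :: rest) f.toList)
            || pvFemale.any (fun f => PySem.Chars.isIn f.toList rest)) := by
      rw [Bool.eq_iff_iff]
      simp only [List.any_eq_true, Bool.or_eq_true]
      constructor
      · rintro ⟨f, hf, h⟩
        rw [hcond f] at h
        rcases Bool.or_eq_true _ _ |>.mp h with h | h
        · exact Or.inl ⟨f, hf, h⟩
        · exact Or.inr ⟨f, hf, h⟩
      · rintro (⟨f, hf, h⟩ | ⟨f, hf, h⟩) <;>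
          exact ⟨f, hf, by rw [hcond f]; simp [h]⟩
    rw [hany]
    by_cases h1 : pvFemale.any (fun f => PySem.Chars.startswith (c :: rest) f.toList) = true <;>
      simp [h1]

-- deleting '-' via str.replace(..., "-", "") equals filtering '-' characters out
theorem replace_go_dash (fuel : Nat) (l acc : List Char) (h : l.length ≤ fuel) :
    PySem.Chars.replace.go ['-'] [] fuel l acc
      = acc.reverse ++ l.filter (fun ch => ch != '-') := by
  induction fuel generalizing l acc with
  | zero =>
    have : l = [] := List.length_eq_zero_iff.mp (Nat.le_zero.mp h)
    subst this
    simp [PySem.Chars.replace.go]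
  | succ n ih =>
    cases l with
    | nil => simp [PySem.Chars.replace.go]
    | cons c t =>
      simp only [PySem.Chars.replace.go]
      by_cases hc : c = '-'
      · subst hc
        rw [if_pos (by simp [List.isPrefixOf])]
        have hd : List.drop (['-'] : List Char).length ('-' :: t) = t := rfl
        simp only [List.length_cons] at h
        rw [hd, ih _ _ (by omega)]
        simp
      · rw [if_neg (by simp [List.isPrefixOf]; exact fun hq => hc hq.symm)]
        simp only [List.length_cons] at h
        rw [ih _ _ (by omega)]
        simp [hc]

theorem replace_dash (s : List Char) :
    PySem.Chars.replace s ['-'] [] = s.filter (fun ch => ch != '-') := by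
  rw [PySem.Chars.replace]
  simp only [List.isEmpty_cons, if_neg Bool.false_ne_true]
  exact replace_go_dash s.length s [] le_rfl

-- ===== VERDICT (by name: the statement is the Claim_ definition above) =====
theorem guess_gender_py_spec : Claim_equal_guess_gender_py := by
  intro name _
  unfold Spec_guess_gender_py guess_gender_py guess_gender_py_alt
  rw [pvLoopA_eq, pvScanB_eq]
  have hnl : (PySem.Str.replace (PySem.Str.lower name) "-" "").toList
      = (PySem.Str.lower name).toList.filter (fun ch => ch != '-') := by
    rw [PySem.Str.toList_replace]
    exact replace_dash _
  simp [PySem.Str.isIn, hnl]
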